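-- pv_equiv track=rewrite | github.com/banddude/shaffercon | database/scripts/migrate-location-pages.py | extract_service_intros
-- ===== SOURCE A (Python) =====
-- from typing import List, Tuple, Optional
--
-- def extract_service_intros(all_text: List[str]) -> Tuple[str, str]:
--     """Extract residential and commercial service intro texts"""
--     residential_intro = ''
--     commercial_intro = ''
--
--     for text in all_text:
--         if 'provides expert residential electrical services throughout' in text:
--             residential_intro = text
--         elif 'provide comprehensive commercial electrical solutions for' in text:
--             commercial_intro = text
--
--     return residential_intro, commercial_intro
-- ===== SOURCE B (Python) =====
-- def extract_service_intros(all_text):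
--     """Extract residential and commercial service intro texts"""
--     RES = 'provides expert residential electrical services throughout'
--     COM = 'provide comprehensive commercial electrical solutions for'
--     residential_intro = next((t for t in reversed(all_text) if RES in t), '')
--     commercial_intro = next(
--         (t for t in reversed(all_text) if COM in t and RES not in t), '')
--     return residential_intro, commercial_intro
-- ===== Notes on version B (the rewrite author's own statement) =====
-- stated objective: alternative
-- what changed: Replaces the single interleaved if/elif accumulator loop with two independent backward scans (next over reversed(all_text)) that pick the last residential match and the last commercial-but-not-residential match directly.
import Mathlib
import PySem

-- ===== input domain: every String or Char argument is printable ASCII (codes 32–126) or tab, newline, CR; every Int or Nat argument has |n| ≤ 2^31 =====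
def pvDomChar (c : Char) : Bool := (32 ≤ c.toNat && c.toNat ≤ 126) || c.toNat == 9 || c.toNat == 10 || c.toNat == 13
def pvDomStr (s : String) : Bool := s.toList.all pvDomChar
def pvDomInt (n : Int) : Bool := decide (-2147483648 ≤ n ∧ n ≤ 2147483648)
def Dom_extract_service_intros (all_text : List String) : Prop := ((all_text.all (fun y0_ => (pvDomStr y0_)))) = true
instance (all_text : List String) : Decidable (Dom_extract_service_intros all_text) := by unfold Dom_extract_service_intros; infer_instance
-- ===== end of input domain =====

-- B replaces A's single interleaved if/elif loop with two independent backward scans; same cost, different decomposition.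

-- ===== PORT A =====
def extract_service_intros (all_text : List String) : String × String :=
  all_text.foldl
    (fun (acc : String × String) (text : String) =>
      if PySem.Str.isIn "provides expert residential electrical services throughout" text then
        (text, acc.2)
      else if PySem.Str.isIn "provide comprehensive commercial electrical solutions for" text then
        (acc.1, text)
      else acc)
    ("", "")

-- ===== PORT B =====
def extract_service_intros_alt (all_text : List String) : String × String :=
  let RES := "provides expert residential electrical services throughout"
  let COM := "provide comprehensive commercial electrical solutions for"
  let residential_intro :=
    (all_text.reverse.find? (fun t => PySem.Str.isIn RES t)).getD ""
  let commercial_intro :=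
    (all_text.reverse.find? (fun t => PySem.Str.isIn COM t && !PySem.Str.isIn RES t)).getD ""
  (residential_intro, commercial_intro)

-- ===== PRECONDITION & SPEC =====
def Spec_extract_service_intros (all_text : List String) (out : String × String) : Prop := out = extract_service_intros_alt all_text
instance (all_text : List String) (out : String × String) : Decidable (Spec_extract_service_intros all_text out) := by unfold Spec_extract_service_intros; infer_instance

-- ===== CLAIM (what is proved, stated in full; the proofs are below) =====
def Claim_equal_extract_service_intros : Prop := ∀ (all_text : List String), Dom_extract_service_intros all_text → Spec_extract_service_intros all_text (extract_service_intros all_text)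

-- ===== LEMMAS AND PROOFS =====

-- A's fold, from any accumulator, yields the last match of each category (elif makes
-- the commercial slot update only when the residential substring is absent).
theorem foldl_extract_eq (l : List String) (r c : String) :
    l.foldl
      (fun (acc : String × String) (text : String) =>
        if PySem.Str.isIn "provides expert residential electrical services throughout" text then
          (text, acc.2)
        else if PySem.Str.isIn "provide comprehensive commercial electrical solutions for" text then
          (acc.1, text)
        else acc)
      (r, c)
    = ((l.reverse.find? (fun t =>
          PySem.Str.isIn "provides expert residential electrical services throughout" t)).getD r,
       (l.reverse.find? (fun t =>
          PySem.Str.isIn "provide comprehensive commercial electrical solutions for" t &&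
          !PySem.Str.isIn "provides expert residential electrical services throughout" t)).getD c) := by
  induction l generalizing r c with
  | nil => simp
  | cons t l ih =>
    simp only [List.foldl_cons, List.reverse_cons, List.find?_append]
    by_cases hR : PySem.Str.isIn "provides expert residential electrical services throughout" t = true
    · simp only [hR, if_true]
      rw [ih]
      cases hfR : l.reverse.find? (fun t =>
          PySem.Str.isIn "provides expert residential electrical services throughout" t) <;>
        cases hfC : l.reverse.find? (fun t =>
          PySem.Str.isIn "provide comprehensive commercial electrical solutions for" t &&
          !PySem.Str.isIn "provides expert residential electrical services throughout" t) <;>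
        simp only [List.find?_cons, List.find?_nil, hR, Bool.not_true, Bool.and_false] <;> rfl
    · rw [Bool.not_eq_true] at hR
      by_cases hC : PySem.Str.isIn "provide comprehensive commercial electrical solutions for" t = true
      · simp only [hR, hC, Bool.false_eq_true, if_false, if_true]
        rw [ih]
        cases hfR : l.reverse.find? (fun t =>
            PySem.Str.isIn "provides expert residential electrical services throughout" t) <;>
          cases hfC : l.reverse.find? (fun t =>
            PySem.Str.isIn "provide comprehensive commercial electrical solutions for" t &&
            !PySem.Str.isIn "provides expert residential electrical services throughout" t) <;>
          simp only [List.find?_cons, List.find?_nil, hR, hC, Bool.not_false, Bool.and_true] <;> rfl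
      · rw [Bool.not_eq_true] at hC
        simp only [hR, hC, Bool.false_eq_true, if_false]
        rw [ih]
        cases hfR : l.reverse.find? (fun t =>
            PySem.Str.isIn "provides expert residential electrical services throughout" t) <;>
          cases hfC : l.reverse.find? (fun t =>
            PySem.Str.isIn "provide comprehensive commercial electrical solutions for" t &&
            !PySem.Str.isIn "provides expert residential electrical services throughout" t) <;>
          simp only [List.find?_cons, List.find?_nil, hR, hC, Bool.false_and] <;> rfl

-- ===== VERDICT (by name: the statement is the Claim_ definition above) =====
theorem extract_service_intros_spec : Claim_equal_extract_service_intros := by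
  intro all_text _
  unfold Spec_extract_service_intros extract_service_intros extract_service_intros_alt
  exact foldl_extract_eq all_text "" ""
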